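-- pv_equiv track=rewrite | github.com/sandhu090/bmpFileParserandEditor | bmpParserAndEditor.py | oneBitExtraction
-- ===== SOURCE A (Python) =====
-- def oneBitExtraction(pixelData, width, pallete):
--     pixels = []
--     for scanLine in pixelData:
--
--         pixelCounter = 0
--         rowOfPixels  = []
--
--         for byte in scanLine:
--             bits = [(byte >> i) & 1 for i in range(7, -1, -1)]
--             for palleteIdx in bits:
--                 if(pixelCounter >= width):
--                     break
--                 rowOfPixels.append(pallete[palleteIdx])
--                 pixelCounter +=1
--         pixels.append(rowOfPixels)
--     return pixels
-- ===== SOURCE B (Python) =====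
-- def oneBitExtraction(pixelData, width, pallete):
--     # Random-access: compute each pixel directly from its index; no bit-list expansion.
--     pixels = []
--     for row in pixelData:
--         n = min(max(0, width), 8 * len(row))
--         pixels.append([pallete[(row[p >> 3] >> (7 - (p & 7))) & 1] for p in range(n)])
--     return pixels
-- ===== Notes on version B (the rewrite author's own statement) =====
-- stated objective: simpler
-- what changed: Replaces A's byte-by-byte bit expansion with a counter and break by direct random access: each output pixel p of a row is computed on the fly from row[p >> 3] shifted by 7 - (p & 7), over range(min(max(0,width), 8*len(row))); no intermediate bit list, no counter, no break.
import Mathlib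
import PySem

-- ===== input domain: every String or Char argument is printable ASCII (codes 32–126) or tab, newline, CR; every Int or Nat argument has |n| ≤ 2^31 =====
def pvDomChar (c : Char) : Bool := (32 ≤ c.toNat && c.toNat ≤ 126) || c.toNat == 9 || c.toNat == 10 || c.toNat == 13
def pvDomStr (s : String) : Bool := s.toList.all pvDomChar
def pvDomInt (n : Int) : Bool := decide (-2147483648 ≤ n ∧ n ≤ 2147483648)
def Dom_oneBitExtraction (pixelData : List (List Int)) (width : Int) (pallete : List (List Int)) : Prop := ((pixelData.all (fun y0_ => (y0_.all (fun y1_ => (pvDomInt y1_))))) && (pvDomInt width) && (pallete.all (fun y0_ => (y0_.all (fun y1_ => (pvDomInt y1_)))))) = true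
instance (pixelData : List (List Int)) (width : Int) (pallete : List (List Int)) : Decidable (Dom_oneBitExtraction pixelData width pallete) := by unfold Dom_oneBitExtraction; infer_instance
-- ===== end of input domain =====

-- B replaces A's byte-by-byte bit expansion with counter-and-break by direct random access:
-- each output pixel p is computed from row[p >> 3] with shift 7 - (p & 7) — objective: simpler.

-- ===== PORT A =====
-- pallete[palleteIdx] is PySem.List.pyGet?; Pre_ guarantees 'some', '.getD []' never fires inside Pre_.
-- The Python 'break' leaves the per-bit loop with the state unchanged once pixelCounter ≥ width;
-- the guard 'if st.1 ≥ width then st' is that same behaviour expressed as a fold.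
def oneBitExtraction (pixelData : List (List Int)) (width : Int) (pallete : List (List Int)) : List (List (List Int)) :=
  pixelData.foldl
    (fun pixels scanLine =>
      let st := scanLine.foldl
        (fun (st : Int × List (List Int)) byte =>
          let bits := (PySem.List.pyRange 7 (-1) (-1)).map (fun i => PySem.Int.band (byte >>> i) 1)
          bits.foldl
            (fun st palleteIdx =>
              if st.1 ≥ width then st
              else (st.1 + 1, st.2 ++ [(PySem.List.pyGet? pallete palleteIdx).getD []]))
            st)
        (0, [])
      pixels ++ [st.2])
    []

-- ===== PORT B =====
-- range(n) with n = min(max(0,width), 8*len(row)) ≥ 0 is pyRange 0 n 1; p >> 3 and p & 7 are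
-- Int >>> and PySem.Int.band (Python-exact); row[p >> 3] is pyGet? (always in range, so '.getD 0'
-- never fires); pallete[…] is pyGet? with '.getD []' (Pre_ makes it 'some').
def oneBitExtraction_alt (pixelData : List (List Int)) (width : Int) (pallete : List (List Int)) : List (List (List Int)) :=
  pixelData.foldl
    (fun pixels row =>
      let n := min (max 0 width) (8 * (row.length : Int))
      pixels ++ [(PySem.List.pyRange 0 n 1).map (fun p =>
        (PySem.List.pyGet? pallete
          (PySem.Int.band (((PySem.List.pyGet? row (p >>> (3 : Int))).getD 0) >>> ((7 : Int) - PySem.Int.band p 7)) 1)).getD [])])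
    []

-- ===== PRECONDITION & SPEC =====
-- Pre_ excludes exactly the inputs where Python A raises IndexError: some bit whose pixel
-- position lies below width indexes past the end of the palette.
def Pre_oneBitExtraction (pixelData : List (List Int)) (width : Int) (pallete : List (List Int)) : Prop :=
  ∀ row ∈ pixelData, ∀ j : Nat, j < row.length → ∀ k : Nat, k < 8 →
    (8 * (j : Int) + (k : Int) < width) →
    PySem.Int.band ((row.getD j 0) >>> ((7 : Int) - (k : Int))) 1 < (pallete.length : Int)
instance (pixelData : List (List Int)) (width : Int) (pallete : List (List Int)) : Decidable (Pre_oneBitExtraction pixelData width pallete) := by unfold Pre_oneBitExtraction; infer_instance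
def pvWitness_oneBitExtraction : List (List Int) × Int × List (List Int) := ([[5, 200]], 10, [[0, 0, 0], [255, 255, 255]])
def Spec_oneBitExtraction (pixelData : List (List Int)) (width : Int) (pallete : List (List Int)) (out : List (List (List Int))) : Prop := out = oneBitExtraction_alt pixelData width pallete
instance (pixelData : List (List Int)) (width : Int) (pallete : List (List Int)) (out : List (List (List Int))) : Decidable (Spec_oneBitExtraction pixelData width pallete out) := by unfold Spec_oneBitExtraction; infer_instance

-- ===== CLAIM (what is proved, stated in full; the proofs are below) =====
def Claim_equal_oneBitExtraction : Prop := ∀ (pixelData : List (List Int)) (width : Int) (pallete : List (List Int)), Dom_oneBitExtraction pixelData width pallete → Pre_oneBitExtraction pixelData width pallete → Spec_oneBitExtraction pixelData width pallete (oneBitExtraction pixelData width pallete)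

-- ===== LEMMAS AND PROOFS =====

-- The bit A produces at flat position p of a scanline, in canonical form.
def pvBitAt (row : List Int) (p : Nat) : Int :=
  PySem.Int.band ((row.getD (p / 8) 0) >>> ((7 : Int) - ((p % 8 : Nat) : Int))) 1

-- A's innermost per-bit fold, characterised: it appends the mapped prefix of the bit list
-- bounded by the remaining budget (width - counter), advancing the counter accordingly.
theorem pvBitFold (width : Int) (pallete : List (List Int)) :
    ∀ (l : List Int) (c : Int) (acc : List (List Int)),
      l.foldl (fun (st : Int × List (List Int)) palleteIdx =>
          if st.1 ≥ width then st
          else (st.1 + 1, st.2 ++ [(PySem.List.pyGet? pallete palleteIdx).getD []])) (c, acc)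
        = (c + (min l.length (width - c).toNat : Nat),
           acc ++ (l.take (width - c).toNat).map
             (fun idx => (PySem.List.pyGet? pallete idx).getD [])) := by
  intro l
  induction l with
  | nil => intro c acc; simp
  | cons x xs ih =>
    intro c acc
    by_cases h : c ≥ width
    · have ht : (width - c).toNat = 0 := by omega
      simp [List.foldl_cons, h, ht, ih]
    · have ht : (width - c).toNat = (width - (c + 1)).toNat + 1 := by omega
      rw [List.foldl_cons, if_neg h, ih (c + 1), ht, List.take_succ_cons]
      rw [Prod.mk.injEq]
      exact ⟨by simp only [List.length_cons]; push_cast; omega, by simp⟩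

-- A's per-byte fold over a scanline, characterised against the flat bit list.
theorem pvByteFold (width : Int) (pallete : List (List Int)) :
    ∀ (scanLine : List Int) (c : Int) (acc : List (List Int)),
      scanLine.foldl (fun (st : Int × List (List Int)) byte =>
          ((PySem.List.pyRange 7 (-1) (-1)).map (fun i => PySem.Int.band (byte >>> i) 1)).foldl
            (fun st palleteIdx =>
              if st.1 ≥ width then st
              else (st.1 + 1, st.2 ++ [(PySem.List.pyGet? pallete palleteIdx).getD []])) st) (c, acc)
        = (c + (min (scanLine.flatMap (fun byte =>
               (PySem.List.pyRange 7 (-1) (-1)).map (fun i => PySem.Int.band (byte >>> i) 1))).length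
               (width - c).toNat : Nat),
           acc ++ ((scanLine.flatMap (fun byte =>
               (PySem.List.pyRange 7 (-1) (-1)).map (fun i => PySem.Int.band (byte >>> i) 1))).take
               (width - c).toNat).map (fun idx => (PySem.List.pyGet? pallete idx).getD [])) := by
  intro scanLine
  induction scanLine with
  | nil => intro c acc; simp
  | cons b rest ih =>
    intro c acc
    rw [List.foldl_cons, pvBitFold width pallete _ c acc, ih]
    simp only [List.flatMap_cons, List.take_append, List.map_append, List.length_append,
      List.append_assoc]
    rw [Prod.mk.injEq]
    constructor
    · push_cast; omega
    · have h2 : (width - (c + ((min ((PySem.List.pyRange 7 (-1) (-1)).map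
          (fun i => PySem.Int.band (b >>> i) 1)).length (width - c).toNat : Nat) : Int))).toNat
          = (width - c).toNat - ((PySem.List.pyRange 7 (-1) (-1)).map
          (fun i => PySem.Int.band (b >>> i) 1)).length := by omega
      rw [h2]

-- The flat bit list of a scanline, indexed canonically.
theorem pvFlat_eq : ∀ (row : List Int),
    row.flatMap (fun byte =>
        (PySem.List.pyRange 7 (-1) (-1)).map (fun i => PySem.Int.band (byte >>> i) 1))
      = (List.range (8 * row.length)).map (pvBitAt row) := by
  intro row
  induction row with
  | nil => simp
  | cons b rest ih =>
    rw [List.flatMap_cons, ih,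
        show 8 * (b :: rest).length = 8 + 8 * rest.length by simp; ring,
        List.range_add, List.map_append, List.map_map]
    -- the 8-bit head (a map over two literal 8-element lists) closes definitionally inside congr
    congr 1
    refine List.map_congr_left (fun k _ => ?_)
    show pvBitAt rest k = (pvBitAt (b :: rest) ∘ fun x => 8 + x) k
    simp only [Function.comp]
    unfold pvBitAt
    have h1 : (8 + k) / 8 = k / 8 + 1 := by omega
    have h2 : (8 + k) % 8 = k % 8 := by omega
    rw [h1, h2, List.getD_cons_succ]

-- B's per-pixel index arithmetic, canonically: ↑k >> 3 selects byte k/8, 7 - (↑k & 7) is 7 - k%8.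
theorem pvPixel_eq (row : List Int) (pallete : List (List Int)) (k : Nat) :
    (PySem.List.pyGet? pallete
        (PySem.Int.band (((PySem.List.pyGet? row ((k : Int) >>> (3 : Int))).getD 0) >>> ((7 : Int) - PySem.Int.band (k : Int) 7)) 1)).getD []
      = (PySem.List.pyGet? pallete (pvBitAt row k)).getD [] := by
  have hs : ((k : Int) >>> (3 : Int)) = ((k / 8 : Nat) : Int) := by
    rw [show (3 : Int) = ((3 : Nat) : Int) from rfl, Int.shiftRight_natCast_right]
    have : (k : Int) >>> (3 : Nat) = ((k >>> 3 : Nat) : Int) := Int.mem_toNat?.mp rfl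
    rw [this, Nat.shiftRight_eq_div_pow]
  have hb : PySem.Int.band (k : Int) 7 = ((k % 8 : Nat) : Int) := by
    rw [show (7 : Int) = ((7 : Nat) : Int) from rfl, PySem.Int.band_natCast]
    congr 1
    have := Nat.and_two_pow_sub_one_eq_mod k 3
    simpa using this
  rw [hs, hb, PySem.List.pyGet?_natCast, pvBitAt, List.getD_eq_getElem?_getD]

theorem oneBitExtraction_eq (pixelData : List (List Int)) (width : Int) (pallete : List (List Int)) :
    oneBitExtraction pixelData width pallete = oneBitExtraction_alt pixelData width pallete := by
  unfold oneBitExtraction oneBitExtraction_alt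
  rw [PySem.List.foldl_append_singleton_eq_map, PySem.List.foldl_append_singleton_eq_map]
  refine List.map_congr_left (fun row _ => ?_)
  rw [pvByteFold width pallete row 0 []]
  simp only [List.nil_append]
  rw [pvFlat_eq row]
  have hn : (min (max 0 width) (8 * (row.length : Int))).toNat
      = min (width - 0).toNat (8 * row.length) := by omega
  rw [PySem.List.pyRange_one]
  simp only [zero_add, Int.sub_zero, hn]
  rw [← List.map_take, List.take_range, List.map_map, List.map_map]
  refine List.map_congr_left (fun k _ => ?_)
  exact (pvPixel_eq row pallete k).symm

-- ===== VERDICT (by name: the statement is the Claim_ definition above) =====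
theorem oneBitExtraction_spec : Claim_equal_oneBitExtraction := by
  intro pixelData width pallete _ _
  exact oneBitExtraction_eq pixelData width pallete
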